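-- pv_equiv track=rewrite | github.com/peterjc123/functionary | functionary/train/train.py | extract_unmasked_chunks
-- ===== SOURCE A (Python) =====
-- from typing import List, Optional
--
-- def extract_unmasked_chunks(labels: List[int], masked_value) -> List[List[int]]:
--     """This function is used to extract unmasked chunks of integer
--     For example, labels = [-100, -100, 1, 2, 3, -100, -100, 4, 5] --> chunks = [[1,2,3], [4,5]]
--     Args:
--         labels (List[int]): list of integer containing token_id and -100
--
--     Returns:
--         List[List[int]]: list of chunk, for example: [[1,2,3], [4,5]]
--     """
--     chunks = []
--     chunk = []
--     for token_id in labels: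
--         if token_id != masked_value:
--             chunk.append(token_id)
--         else:
--             if len(chunk) > 0:
--                 chunks.append(chunk)
--                 chunk = []
--     if len(chunk) > 0:
--         chunks.append(chunk)
--     return chunks
-- ===== SOURCE B (Python) =====
-- def extract_unmasked_chunks(labels, masked_value):
--     res = []
--     rest = labels
--     while rest:
--         if rest[0] == masked_value:
--             rest = rest[1:]
--         else:
--             j = 0
--             while j < len(rest) and rest[j] != masked_value:
--                 j += 1
--             res.append(rest[:j])
--             rest = rest[j:]
--     return res
-- ===== Notes on version B (the rewrite author's own statement) =====
-- stated objective: alternative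
-- what changed: Replaces A's accumulator/flush state machine (grow a current chunk, flush on each masked token and at the end) with a run-based scan: skip masked tokens, then slice out the whole maximal unmasked run at once (takewhile/dropwhile decomposition).
import Mathlib
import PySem

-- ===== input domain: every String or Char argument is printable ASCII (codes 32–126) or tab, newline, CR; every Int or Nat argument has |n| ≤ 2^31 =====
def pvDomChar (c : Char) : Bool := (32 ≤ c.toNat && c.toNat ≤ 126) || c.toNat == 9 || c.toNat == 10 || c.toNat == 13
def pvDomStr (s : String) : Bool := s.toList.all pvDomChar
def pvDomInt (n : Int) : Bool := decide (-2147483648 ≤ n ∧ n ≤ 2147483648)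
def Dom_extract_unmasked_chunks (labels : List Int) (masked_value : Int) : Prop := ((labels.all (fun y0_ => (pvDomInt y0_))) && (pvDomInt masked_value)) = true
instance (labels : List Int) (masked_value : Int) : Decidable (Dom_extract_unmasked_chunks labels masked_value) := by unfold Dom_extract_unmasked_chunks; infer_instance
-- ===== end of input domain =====

-- B replaces A's accumulator/flush state machine with a run-based scan (skip masked, slice out each maximal unmasked run); alternative decomposition, same cost.

-- ===== PORT A =====
-- A: fold over labels with state (chunks, chunk); append to chunk when unmasked, flush chunk on masked; final flush.
def extract_unmasked_chunks (labels : List Int) (masked_value : Int) : List (List Int) :=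
  let st := labels.foldl
    (fun (s : List (List Int) × List Int) token_id =>
      if token_id ≠ masked_value then (s.1, s.2 ++ [token_id])
      else if s.2.length > 0 then (s.1 ++ [s.2], ([] : List Int)) else s)
    ([], [])
  if st.2.length > 0 then st.1 ++ [st.2] else st.1

-- ===== PORT B =====
-- B: while rest nonempty — drop a masked head, else the inner index scan computes j = length of the
-- maximal unmasked prefix, so rest[:j] = takeWhile (· ≠ m) rest and rest[j:] = dropWhile (· ≠ m) rest.
def extract_unmasked_chunks_alt (labels : List Int) (masked_value : Int) : List (List Int) :=
  match labels with
  | [] => []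
  | x :: xs =>
    if x = masked_value then extract_unmasked_chunks_alt xs masked_value
    else ((x :: xs).takeWhile (fun t => t != masked_value)) ::
         extract_unmasked_chunks_alt ((x :: xs).dropWhile (fun t => t != masked_value)) masked_value
termination_by labels.length
decreasing_by
  · simp
  · have hx : (x != masked_value) = true := by simp_all
    have := List.length_dropWhile_le (fun t => t != masked_value) xs
    simp [List.dropWhile, hx]; omega

-- ===== PRECONDITION & SPEC =====
def Spec_extract_unmasked_chunks (labels : List Int) (masked_value : Int) (out : List (List Int)) : Prop := out = extract_unmasked_chunks_alt labels masked_value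
instance (labels : List Int) (masked_value : Int) (out : List (List Int)) : Decidable (Spec_extract_unmasked_chunks labels masked_value out) := by unfold Spec_extract_unmasked_chunks; infer_instance

-- ===== CLAIM (what is proved, stated in full; the proofs are below) =====
def Claim_equal_extract_unmasked_chunks : Prop := ∀ (labels : List Int) (masked_value : Int), Dom_extract_unmasked_chunks labels masked_value → Spec_extract_unmasked_chunks labels masked_value (extract_unmasked_chunks labels masked_value)

-- ===== LEMMAS AND PROOFS =====

-- A's loop continued from a partial chunk (proof device characterising A's fold).
def altCont (m : Int) (chunk : List Int) : List Int → List (List Int)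
  | [] => if chunk = [] then [] else [chunk]
  | x :: xs =>
    if x ≠ m then altCont m (chunk ++ [x]) xs
    else if chunk = [] then altCont m [] xs else chunk :: altCont m [] xs

theorem altCont_char (m : Int) (xs : List Int) :
    (∀ c : List Int, c ≠ [] →
      altCont m c xs = (c ++ xs.takeWhile (fun t => t != m)) ::
        extract_unmasked_chunks_alt (xs.dropWhile (fun t => t != m)) m)
    ∧ altCont m [] xs = extract_unmasked_chunks_alt xs m := by
  induction xs with
  | nil =>
    constructor
    · intro c hc
      simp [altCont, hc, extract_unmasked_chunks_alt]
    · simp [altCont, extract_unmasked_chunks_alt]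
  | cons x xs ih =>
    constructor
    · intro c hc
      by_cases hx : x = m
      · subst hx
        simp only [altCont, ne_eq, not_true_eq_false, if_false, if_neg hc]
        rw [ih.2]
        have hpx : (fun t => t != x) x = false := by simp
        simp [List.takeWhile, List.dropWhile, extract_unmasked_chunks_alt]
      · simp only [altCont, if_pos hx]
        rw [(ih.1) (c ++ [x]) (by simp)]
        have hpx : (fun t => t != m) x = true := by simp [hx]
        simp [List.takeWhile, List.dropWhile, hpx]
    · by_cases hx : x = m
      · subst hx
        simp only [altCont, ne_eq, not_true_eq_false, if_false]
        rw [ih.2]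
        simp [extract_unmasked_chunks_alt]
      · simp only [altCont, if_pos hx]
        rw [show ([] : List Int) ++ [x] = [x] from rfl, (ih.1) [x] (by simp)]
        have hpx : (fun t => t != m) x = true := by simp [hx]
        rw [extract_unmasked_chunks_alt]
        simp [List.takeWhile, List.dropWhile, hpx, hx]

theorem foldA_char (m : Int) (xs : List Int) :
    ∀ (chunks : List (List Int)) (chunk : List Int),
      (let st := xs.foldl
          (fun (s : List (List Int) × List Int) token_id =>
            if token_id ≠ m then (s.1, s.2 ++ [token_id])
            else if s.2.length > 0 then (s.1 ++ [s.2], ([] : List Int)) else s)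
          (chunks, chunk)
       if st.2.length > 0 then st.1 ++ [st.2] else st.1)
      = chunks ++ altCont m chunk xs := by
  induction xs with
  | nil =>
    intro chunks chunk
    by_cases hc : chunk = []
    · subst hc; simp [altCont]
    · have : chunk.length > 0 := by
        cases chunk with | nil => simp at hc | cons a l => simp
      simp [altCont, hc, this]
  | cons x xs ih =>
    intro chunks chunk
    by_cases hx : x = m
    · subst hx
      by_cases hc : chunk = []
      · subst hc
        simp only [List.foldl, ne_eq, not_true_eq_false, if_false]
        rw [show (if ([] : List Int).length > 0 then (chunks ++ [[]], ([] : List Int)) else (chunks, ([] : List Int))) = (chunks, ([] : List Int)) by simp]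
        rw [ih chunks []]
        simp [altCont]
      · have hlen : chunk.length > 0 := by
          cases chunk with | nil => simp at hc | cons a l => simp
        simp only [List.foldl, ne_eq, not_true_eq_false, if_false, if_pos hlen]
        rw [ih (chunks ++ [chunk]) []]
        simp [altCont, hc]
    · simp only [List.foldl, ne_eq, hx, not_false_eq_true, if_true]
      rw [ih chunks (chunk ++ [x])]
      simp [altCont, hx]

-- ===== VERDICT (by name: the statement is the Claim_ definition above) =====
theorem extract_unmasked_chunks_spec : Claim_equal_extract_unmasked_chunks := by
  intro labels m _
  unfold Spec_extract_unmasked_chunks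
  exact (foldA_char m labels [] []).trans (by rw [(altCont_char m labels).2]; simp)
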